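-- pv_equiv track=rewrite | github.com/alanjknight/git-playground | Mod1/FizzBuzz/FizzBuzz.py | create_fezz_output
-- ===== SOURCE A (Python) =====
-- def search(list,value):
--     for item in range(len(list)):
--         if list[item] == value:
--             return True
--     return False
--
-- def create_fezz_output(output):
--     new_list = []
--     if len(output) == 0:
--         return ['Fezz']
--     else:
--         for item in output:
--             if item[0] != 'B':
--                 new_list.append(item)
--             else:
--                 if search(new_list,'Fezz') == False:
--                     new_list.append('Fezz')
--                 new_list.append(item)
--     return new_list
-- ===== SOURCE B (Python) =====
-- def create_fezz_output(output):
--     if not output: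
--         return ['Fezz']
--     try:
--         i = next(k for k, item in enumerate(output) if item.startswith('B'))
--     except StopIteration:
--         return list(output)
--     if 'Fezz' in output[:i]:
--         return list(output)
--     return output[:i] + ['Fezz'] + output[i:]
-- ===== Notes on version B (the rewrite author's own statement) =====
-- stated objective: simpler
-- what changed: B replaces A's incremental rebuild with an inner linear rescan for 'Fezz' at every B-item by a single find-first-B index lookup, one membership test on the prefix, and one slice insertion.
import Mathlib
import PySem

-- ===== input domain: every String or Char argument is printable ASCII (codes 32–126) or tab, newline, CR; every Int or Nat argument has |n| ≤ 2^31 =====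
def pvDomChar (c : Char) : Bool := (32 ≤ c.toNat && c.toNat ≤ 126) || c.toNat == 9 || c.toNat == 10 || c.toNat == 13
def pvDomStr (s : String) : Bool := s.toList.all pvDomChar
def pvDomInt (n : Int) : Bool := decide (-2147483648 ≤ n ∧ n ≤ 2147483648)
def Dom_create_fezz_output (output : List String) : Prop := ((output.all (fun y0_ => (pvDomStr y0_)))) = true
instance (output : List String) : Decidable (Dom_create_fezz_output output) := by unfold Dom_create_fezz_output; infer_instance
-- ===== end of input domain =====

-- B replaces A's incremental rebuild (with an inner rescan for 'Fezz' at each B-item) by a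
-- find-first-B index, one prefix membership test and one slice insertion; objective: simpler.

-- ===== PORT A =====
-- helper 'search': for item in range(len(list)): if list[item] == value: return True; return False
def search_loop (l : List String) (value : String) (item : Nat) : Bool :=
  if h : item < l.length then
    if l[item] == value then true else search_loop l value (item + 1)
  else false
termination_by l.length - item

def search (l : List String) (value : String) : Bool := search_loop l value 0

def create_fezz_output (output : List String) : List String :=
  if output.length = 0 then ["Fezz"]
  else
    output.foldl (fun new_list item =>
      if PySem.Str.pyGet? item 0 ≠ some 'B' then new_list ++ [item]
      else if search new_list "Fezz" = false then new_list ++ ["Fezz", item]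
      else new_list ++ [item]) []

-- ===== PORT B =====
def create_fezz_output_alt (output : List String) : List String :=
  if output = [] then ["Fezz"]
  else
    match output.findIdx? (fun item => PySem.Str.startswith item "B") with
    | none => output
    | some i =>
        if (output.take i).contains "Fezz" then output
        else output.take i ++ "Fezz" :: output.drop i

-- ===== PRECONDITION & SPEC =====
-- Pre_ excludes lists containing an empty string: there A raises IndexError on item[0].
def Pre_create_fezz_output (output : List String) : Prop := ∀ s ∈ output, s ≠ ""
instance (output : List String) : Decidable (Pre_create_fezz_output output) := by unfold Pre_create_fezz_output; infer_instance

def pvWitness_create_fezz_output : List String := ["Fizz", "Buzz", "Fezz"]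

def Spec_create_fezz_output (output : List String) (out : List String) : Prop := out = create_fezz_output_alt output
instance (output : List String) (out : List String) : Decidable (Spec_create_fezz_output output out) := by unfold Spec_create_fezz_output; infer_instance

-- ===== CLAIM (what is proved, stated in full; the proofs are below) =====
def Claim_equal_create_fezz_output : Prop := ∀ (output : List String), Dom_create_fezz_output output → Pre_create_fezz_output output → Spec_create_fezz_output output (create_fezz_output output)

-- ===== LEMMAS AND PROOFS =====

-- A's helper scans indices upward: it decides membership in the dropped suffix
theorem search_loop_eq (l : List String) (v : String) (i : Nat) :
    search_loop l v i = (l.drop i).contains v := by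
  fun_induction search_loop l v i with
  | case1 i h hv =>
      rw [List.drop_eq_getElem_cons h]
      simp only [List.contains_cons]
      simp only [beq_iff_eq] at hv
      simp [hv]
  | case2 i h hv ih =>
      rw [List.drop_eq_getElem_cons h]
      simp only [List.contains_cons, ih]
      have hne : (v == l[i]) = false := beq_eq_false_iff_ne.mpr (fun hh => hv (beq_iff_eq.mpr hh.symm))
      rw [hne, Bool.false_or]
  | case3 i h =>
      rw [List.drop_of_length_le (by omega)]
      rfl

theorem search_eq (l : List String) (v : String) : search l v = l.contains v := by
  simpa using search_loop_eq l v 0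

-- the condition A tests on each item, as a Bool
def isB (s : String) : Bool := PySem.Str.pyGet? s 0 == some 'B'

theorem isB_iff_head (s : String) (c : Char) (cs : List Char) (hcl : s.toList = c :: cs) :
    isB s = (c == 'B') := by
  simp [isB, hcl]

-- for a nonempty string, item[0] == 'B' is exactly item.startswith('B')
theorem head_eq_iff_startswith (s : String) (h : s ≠ "") :
    isB s = PySem.Str.startswith s "B" := by
  have hl : s.toList ≠ [] := by
    simpa [String.toList_eq_nil_iff] using h
  cases hcl : s.toList with
  | nil => exact absurd hcl hl
  | cons c cs =>
      rw [isB_iff_head s c cs hcl]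
      rcases hs : PySem.Str.startswith s "B" with _ | _
      · rw [Bool.eq_false_iff] at hs ⊢
        intro hb
        apply hs
        rw [PySem.Str.startswith_eq, PySem.Chars.startswith_iff]
        simp only [beq_iff_eq] at hb
        simp [hcl, hb, List.cons_prefix_cons]
      · rw [PySem.Str.startswith_eq, PySem.Chars.startswith_iff] at hs
        rw [hcl] at hs
        have hc : 'B' = c := by
          simpa [List.cons_prefix_cons] using hs
        simp [hc.symm]

-- the abstract shape of A's loop, the flag = '"Fezz" is in the accumulator so far'
def gA (b : Bool) : List String → List String
  | [] => []
  | x :: xs =>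
      if isB x = false then x :: gA (b || decide ("Fezz" = x)) xs
      else if b then x :: gA b xs
      else "Fezz" :: x :: gA true xs

theorem foldl_eq_gA (l : List String) : ∀ acc : List String,
    l.foldl (fun new_list item =>
      if PySem.Str.pyGet? item 0 ≠ some 'B' then new_list ++ [item]
      else if search new_list "Fezz" = false then new_list ++ ["Fezz", item]
      else new_list ++ [item]) acc = acc ++ gA (decide ("Fezz" ∈ acc)) l := by
  induction l with
  | nil => intro acc; simp [gA]
  | cons x xs ih =>
      intro acc
      rcases hx : isB x with _ | _
      · rw [List.foldl_cons, if_pos (by simp only [isB, beq_eq_false_iff_ne] at hx; simpa using hx),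
            ih (acc ++ [x])]
        rw [gA, if_pos hx]
        have hca : decide ("Fezz" ∈ acc ++ [x]) = (decide ("Fezz" ∈ acc) || decide ("Fezz" = x)) := by
          simp
        rw [hca, List.append_assoc]
        rfl
      · have hxp : ¬ (PySem.Str.pyGet? x 0 ≠ some 'B') := by
          simp only [isB, beq_iff_eq] at hx; simpa using hx
        rcases hb : decide ("Fezz" ∈ acc) with _ | _
        · rw [List.foldl_cons, if_neg hxp,
             if_pos (by rw [search_eq]; simp [hb]), ih (acc ++ ["Fezz", x])]
          have h2 : decide ("Fezz" ∈ acc ++ ["Fezz", x]) = true := by simp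
          rw [h2, gA, if_neg (by simp [hx]), if_neg (by simp), List.append_assoc]
          rfl
        · rw [List.foldl_cons, if_neg hxp,
             if_neg (by rw [search_eq]; simp [hb]), ih (acc ++ [x])]
          have h2 : decide ("Fezz" ∈ acc ++ [x]) = true := by
            simp only [List.mem_append, decide_eq_true_iff] at hb ⊢
            exact Or.inl hb
          rw [h2, gA, if_neg (by simp [hx]), if_pos rfl, List.append_assoc]
          rfl

-- once 'Fezz' has been seen, A's loop copies the rest unchanged
theorem gA_true (l : List String) : gA true l = l := by
  induction l with
  | nil => rfl
  | cons x xs ih =>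
      rcases hx : isB x with _ | _
      · rw [gA, if_pos hx, Bool.true_or, ih]
      · rw [gA, if_neg (by simp [hx]), if_pos rfl, ih]

-- main characterisation: A's loop computes B's find-index/slice result
theorem gA_main (l : List String) (hpre : ∀ s ∈ l, s ≠ "") (b : Bool) :
    gA b l = match l.findIdx? (fun item => PySem.Str.startswith item "B") with
    | none => l
    | some i =>
        if (b || decide ("Fezz" ∈ l.take i)) then l
        else l.take i ++ "Fezz" :: l.drop i := by
  induction l generalizing b with
  | nil => simp [gA]
  | cons x xs ih =>
      have hx0 : x ≠ "" := hpre x (by simp)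
      rw [List.findIdx?_cons]
      rcases hsw : PySem.Str.startswith x "B" with _ | _
      · have hxB : isB x = false := by rw [head_eq_iff_startswith x hx0, hsw]
        simp only [Bool.false_eq_true, if_false]
        have hgx : gA b (x :: xs) = x :: gA (b || decide ("Fezz" = x)) xs := by
          rw [gA, if_pos hxB]
        rw [hgx, ih (fun s hs => hpre s (by simp [hs])) (b || decide ("Fezz" = x))]
        cases hfi : xs.findIdx? (fun item => PySem.Str.startswith item "B") with
        | none => simp
        | some i =>
            simp only [Option.map_some]
            have ht : (x :: xs).take (i + 1) = x :: xs.take i := by simp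
            rw [ht]
            have hc : decide ("Fezz" ∈ x :: xs.take i)
                = (decide ("Fezz" = x) || decide ("Fezz" ∈ xs.take i)) := by simp
            rw [hc, ← Bool.or_assoc]
            rcases hflag : (b || decide ("Fezz" = x) || decide ("Fezz" ∈ xs.take i)) with _ | _
            · rw [if_neg (by simp), if_neg (by simp)]
              simp
            · rw [if_pos rfl, if_pos rfl]
      · have hxB : isB x = true := by rw [head_eq_iff_startswith x hx0, hsw]
        simp only [if_true]
        simp only [List.take_zero, List.drop_zero, List.not_mem_nil, decide_false, Bool.or_false]
        cases b with
        | true =>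
            rw [if_pos rfl, gA_true]
        | false =>
            rw [gA, if_neg (by simp [hxB]), if_neg (by simp), gA_true]
            simp

-- ===== VERDICT (by name: the statement is the Claim_ definition above) =====
theorem create_fezz_output_spec : Claim_equal_create_fezz_output := by
  intro output _ hpre
  unfold Spec_create_fezz_output create_fezz_output create_fezz_output_alt
  cases output with
  | nil => simp
  | cons x xs =>
      rw [if_neg (by simp), if_neg (by simp)]
      rw [foldl_eq_gA (x :: xs) []]
      simp only [List.not_mem_nil, decide_false, List.nil_append]
      rw [gA_main (x :: xs) hpre false]
      cases hfi : (x :: xs).findIdx? (fun item => PySem.Str.startswith item "B") <;> simp
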